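-- pv_equiv track=rewrite | github.com/0x2f8f/acm.timus.ru | python/1149/1149.py | funSin2
-- ===== SOURCE A (Python) =====
-- def funSin(n):
--     st = "";
--     i=n;
--     while i > 0:
--         if i == n:
--             st = "sin("+str(i)+")"
--         else:
--             symb = "-" if i%2 else "+"
--             st = "sin("+str(i)+symb+st+")"
--         i -= 1
--     #sin(1–sin(2+sin(3 - sin(4)))
--     #sin(1–sin(2+sin(3))
--     #sin(1-sin(2))
--     #sin(1)
--     return st
--
-- def funSin2(n):
--     st = "";
--     i=0;
--     while i<n:
--         if (i == 0):
--             st = funSin(i+1)+"+"+str(n)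
--         else:
--             st = "("+st+")"+funSin(i+1)+"+"+str(n-i)
--         i += 1
--     return st;
-- ===== SOURCE B (Python) =====
-- def funSin(n):
--     if n < 1:
--         return ""
--     parts = ["sin(" + str(i) + ("-" if i % 2 else "+") for i in range(1, n)]
--     parts.append("sin(" + str(n) + ")")
--     return "".join(parts) + ")" * (n - 1)
--
-- def funSin2(n):
--     if n < 1:
--         return ""
--     pieces = [funSin(1) + "+" + str(n)]
--     pieces += [")" + funSin(i + 1) + "+" + str(n - i) for i in range(1, n)]
--     return "(" * (n - 1) + "".join(pieces)
-- ===== Notes on version B (the rewrite author's own statement) =====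
-- stated objective: faster
-- what changed: Both helpers are rewritten as single forward passes that precompute the fragment list (and the bracket counts as replicates) and join it once, instead of A's inside-out wrapping of a string accumulator in backward/forward while-loops.
import Mathlib
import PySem

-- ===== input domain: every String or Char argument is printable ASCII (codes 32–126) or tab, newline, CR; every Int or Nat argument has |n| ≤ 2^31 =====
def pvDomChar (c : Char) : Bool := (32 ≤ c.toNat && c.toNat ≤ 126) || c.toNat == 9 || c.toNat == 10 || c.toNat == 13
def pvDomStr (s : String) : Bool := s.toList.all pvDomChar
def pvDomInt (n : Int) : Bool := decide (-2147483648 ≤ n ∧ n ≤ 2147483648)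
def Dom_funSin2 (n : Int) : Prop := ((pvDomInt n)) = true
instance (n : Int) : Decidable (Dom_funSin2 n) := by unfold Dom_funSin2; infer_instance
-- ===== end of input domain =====

-- B replaces A's two inside-out while-loop string accumulations by forward passes that
-- join precomputed fragment lists once (objective: faster, measured).

-- ===== PORT A =====
-- while i > 0 loop of funSin, state st; i counts down
def funSinLoopA (n i : Int) (st : String) : String :=
  if _h : i > 0 then
    funSinLoopA n (i - 1)
      (if i == n then "sin(" ++ PySem.Int.toStr i ++ ")"
       else
         let symb := if PySem.Int.mod i 2 ≠ 0 then "-" else "+"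
         "sin(" ++ PySem.Int.toStr i ++ symb ++ st ++ ")")
  else st
termination_by i.toNat
decreasing_by omega

def funSinA (n : Int) : String := funSinLoopA n n ""

-- while i < n loop of funSin2, state st; i counts up
def funSin2Loop (n i : Int) (st : String) : String :=
  if _h : i < n then
    funSin2Loop n (i + 1)
      (if i == 0 then funSinA (i + 1) ++ "+" ++ PySem.Int.toStr n
       else "(" ++ st ++ ")" ++ funSinA (i + 1) ++ "+" ++ PySem.Int.toStr (n - i))
  else st
termination_by (n - i).toNat
decreasing_by omega

def funSin2 (n : Int) : String := funSin2Loop n 0 ""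

-- ===== PORT B =====
def funSinB (n : Int) : String :=
  if n < 1 then ""
  else
    String.join
      (((PySem.List.pyRange 1 n 1).map
          (fun i => "sin(" ++ PySem.Int.toStr i ++ (if PySem.Int.mod i 2 ≠ 0 then "-" else "+")))
        ++ ["sin(" ++ PySem.Int.toStr n ++ ")"])
    ++ String.join (List.replicate (n - 1).toNat ")")

def funSin2_alt (n : Int) : String :=
  if n < 1 then ""
  else
    String.join (List.replicate (n - 1).toNat "(")
    ++ String.join
        ((funSinB 1 ++ "+" ++ PySem.Int.toStr n)
          :: (PySem.List.pyRange 1 n 1).map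
               (fun i => ")" ++ funSinB (i + 1) ++ "+" ++ PySem.Int.toStr (n - i)))

-- ===== PRECONDITION & SPEC =====
def Spec_funSin2 (n : Int) (out : String) : Prop := out = funSin2_alt n
instance (n : Int) (out : String) : Decidable (Spec_funSin2 n out) := by unfold Spec_funSin2; infer_instance

-- ===== CLAIM (what is proved, stated in full; the proofs are below) =====
def Claim_equal_funSin2 : Prop := ∀ (n : Int), Dom_funSin2 n → Spec_funSin2 n (funSin2 n)

-- ===== LEMMAS AND PROOFS =====

theorem join_nil : String.join ([] : List String) = "" := rfl

theorem join_cons (a : String) (l : List String) :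
    String.join (a :: l) = a ++ String.join l := by simp [String.join_eq]

theorem join_singleton (a : String) : String.join [a] = a := by simp [String.join_eq]

theorem join_append (l₁ l₂ : List String) :
    String.join (l₁ ++ l₂) = String.join l₁ ++ String.join l₂ := by
  induction l₁ with
  | nil => simp [String.join_eq]
  | cons a l ih => simp [join_cons, ih, String.append_assoc]

-- the inside-out wrapper of funSin's non-first iterations, indexed by a Nat
def wrapA : Nat → String → String
  | 0, st => st
  | k + 1, st =>
      wrapA k ("sin(" ++ PySem.Int.toStr ((k : Int) + 1)
        ++ (if PySem.Int.mod ((k : Int) + 1) 2 ≠ 0 then "-" else "+") ++ st ++ ")")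

theorem funSinLoopA_eq_wrapA (k : Nat) (n : Int) (st : String)
    (h : (k : Int) < n) : funSinLoopA n (k : Int) st = wrapA k st := by
  induction k generalizing st with
  | zero => rw [funSinLoopA]; simp [wrapA]
  | succ k ih =>
      rw [funSinLoopA]
      have h1 : ((k + 1 : Nat) : Int) > 0 := by push_cast; omega
      have h2 : (((k + 1 : Nat) : Int) == n) = false := by simp; omega
      simp only [h1, dif_pos, h2, Bool.false_eq_true, if_false]
      have h3 : ((k + 1 : Nat) : Int) - 1 = (k : Int) := by push_cast; omega
      rw [h3, ih _ (by push_cast at h ⊢; omega)]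
      have hc : ((k + 1 : Nat) : Int) = (k : Int) + 1 := by push_cast; ring
      rw [hc]
      rfl

theorem funSinA_eq (n : Int) (hn : 1 ≤ n) :
    funSinA n = wrapA (n - 1).toNat ("sin(" ++ PySem.Int.toStr n ++ ")") := by
  unfold funSinA
  rw [funSinLoopA]
  have h1 : n > 0 := by omega
  simp only [h1, dif_pos, BEq.rfl, if_pos]
  have h4 : n - 1 = (((n - 1).toNat : Nat) : Int) := by omega
  rw [h4, funSinLoopA_eq_wrapA ((n - 1).toNat) n ("sin(" ++ PySem.Int.toStr n ++ ")")
        (by omega)]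
  simp

theorem wrapA_closed (m : Nat) (st : String) :
    wrapA m st =
      String.join ((PySem.List.pyRange 1 ((m : Int) + 1) 1).map
        (fun i => "sin(" ++ PySem.Int.toStr i ++ (if PySem.Int.mod i 2 ≠ 0 then "-" else "+")))
      ++ st ++ String.join (List.replicate m ")") := by
  induction m generalizing st with
  | zero =>
      simp [wrapA, join_nil]
  | succ m ih =>
      rw [wrapA, ih]
      have hc : ((m + 1 : Nat) : Int) + 1 = ((m : Int) + 1) + 1 := by push_cast; ring
      rw [hc, PySem.List.pyRange_one_succ_right (a := 1) (b := (m : Int) + 1) (by omega),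
          List.replicate_succ]
      rw [List.map_append, List.map_singleton, join_append, join_singleton, join_cons]
      simp only [String.append_assoc]

theorem funSin_eq (n : Int) : funSinA n = funSinB n := by
  by_cases hn : n < 1
  · have h0 : ¬ n > 0 := by omega
    unfold funSinA funSinB
    rw [funSinLoopA]
    simp [h0, hn]
  · have hn1 : 1 ≤ n := by omega
    rw [funSinA_eq n hn1, wrapA_closed, funSinB, if_neg (by omega)]
    have hc : (((n - 1).toNat : Nat) : Int) + 1 = n := by omega
    rw [hc, join_append, join_singleton]

-- closed form of funSin2's loop from i upward (1 ≤ i ≤ n), in B's shape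
theorem funSin2Loop_eq (n : Int) (d : Nat) :
    ∀ (i : Int) (st : String), 1 ≤ i → i ≤ n → (n - i).toNat = d →
    funSin2Loop n i st =
      String.join (List.replicate (n - i).toNat "(")
      ++ st
      ++ String.join ((PySem.List.pyRange i n 1).map
           (fun j => ")" ++ funSinA (j + 1) ++ "+" ++ PySem.Int.toStr (n - j))) := by
  induction d with
  | zero =>
      intro i st h1 h2 hd
      have hin : i = n := by omega
      rw [funSin2Loop]
      subst hin
      simp [PySem.List.pyRange_one_eq_nil (le_refl i), join_nil]
  | succ d ih =>
      intro i st h1 h2 hd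
      have hlt : i < n := by omega
      rw [funSin2Loop]
      have h0 : (i == 0) = false := by simp; omega
      simp only [hlt, dif_pos, h0, Bool.false_eq_true, if_false]
      rw [ih (i + 1) _ (by omega) (by omega) (by omega)]
      have hrep : (n - i).toNat = (n - (i + 1)).toNat + 1 := by omega
      rw [hrep, List.replicate_succ' (n := (n - (i + 1)).toNat)]
      rw [PySem.List.pyRange_one_cons hlt, List.map_cons]
      rw [join_append, join_singleton, join_cons]
      simp only [String.append_assoc]

theorem funSin2_eq (n : Int) : funSin2 n = funSin2_alt n := by
  by_cases hn : n < 1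
  · have h0 : ¬ (0 : Int) < n := by omega
    unfold funSin2 funSin2_alt
    rw [funSin2Loop]
    simp [h0, hn]
  · have hn1 : 1 ≤ n := by omega
    unfold funSin2
    rw [funSin2Loop]
    have h0 : (0 : Int) < n := by omega
    have hz : ((0 : Int) == 0) = true := rfl
    simp only [h0, dif_pos, hz, if_true, zero_add]
    rw [funSin2Loop_eq n (n - 1).toNat 1 _ (by omega) hn1 (by omega)]
    unfold funSin2_alt
    rw [if_neg (by omega), join_cons]
    simp only [funSin_eq, String.append_assoc]

-- ===== VERDICT (by name: the statement is the Claim_ definition above) =====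
theorem funSin2_spec : Claim_equal_funSin2 := by
  intro n _
  unfold Spec_funSin2
  exact funSin2_eq n
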